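-- pv_equiv track=rewrite | github.com/sandeepseth5/experiment | python/largest_x_new.py | traverse_from_top_right
-- ===== SOURCE A (Python) =====
-- def traverse_from_top_right(matrix, aux_matrix):
--     for i in range(len(matrix)):
--         for j in range(len(matrix[0])-1, -1, -1):
--             if i == 0 or j == len(matrix[0])-1:
--                 aux_matrix[i][j] = matrix[i][j]
--             elif matrix[i][j] == 1 and aux_matrix[i-1][j+1] > 0:
--                 aux_matrix[i][j] = aux_matrix[i-1][j+1] + 1
--             else:
--                 aux_matrix[i][j] = matrix[i][j]
--     return aux_matrix
-- ===== SOURCE B (Python) =====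
-- # B: traverses the matrix along anti-diagonals (down-left walks) carrying the
-- # previous diagonal value in an accumulator instead of re-reading
-- # aux_matrix[i-1][j+1]; same in-place mutation of aux_matrix as A.
-- def traverse_from_top_right(matrix, aux_matrix):
--     if not matrix:
--         return aux_matrix
--     rows, cols = len(matrix), len(matrix[0])
--     starts = [(0, j) for j in range(cols)] + [(i, cols - 1) for i in range(1, rows)]
--     for i, j in starts:
--         prev = None
--         while 0 <= j < cols and i < rows:
--             if prev is None or matrix[i][j] != 1 or prev <= 0:
--                 v = matrix[i][j]
--             else:
--                 v = prev + 1
--             aux_matrix[i][j] = v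
--             prev = v
--             i += 1
--             j -= 1
--     return aux_matrix
-- ===== Notes on version B (the rewrite author's own statement) =====
-- stated objective: alternative
-- what changed: B replaces A's row-by-row right-to-left DP that re-reads aux_matrix[i-1][j+1] by an anti-diagonal traversal: from each starting cell on the top row or rightmost column it walks down-left (i+1, j-1) carrying the value just written in an accumulator `prev`, writing each cell exactly once in place.
import Mathlib
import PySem

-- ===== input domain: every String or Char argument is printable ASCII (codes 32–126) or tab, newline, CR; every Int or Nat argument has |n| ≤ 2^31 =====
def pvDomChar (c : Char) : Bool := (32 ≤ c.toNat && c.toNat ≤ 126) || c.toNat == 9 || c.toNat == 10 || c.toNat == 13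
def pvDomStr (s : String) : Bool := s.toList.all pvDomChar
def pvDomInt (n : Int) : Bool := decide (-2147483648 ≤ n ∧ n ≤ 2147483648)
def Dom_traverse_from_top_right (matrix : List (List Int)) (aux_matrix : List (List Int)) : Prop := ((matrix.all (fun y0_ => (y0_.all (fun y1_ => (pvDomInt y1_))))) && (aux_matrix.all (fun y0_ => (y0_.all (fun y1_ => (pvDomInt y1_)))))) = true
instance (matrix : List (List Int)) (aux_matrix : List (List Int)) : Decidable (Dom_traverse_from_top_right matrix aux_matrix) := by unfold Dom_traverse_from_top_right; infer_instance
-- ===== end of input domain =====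

-- B traverses anti-diagonals (down-left walks carrying the previously written value in an
-- accumulator) instead of A's row-by-row DP that re-reads aux_matrix[i-1][j+1]; both Pythons
-- mutate aux_matrix in place and the equivalence proved here is about the returned value
-- (which is that same mutated list).

-- ===== PORT A =====
-- matrix[i][j] read (indices are nonnegative here; exact on in-range indices, Pre_ excludes the rest)
def pvGet2 (a : List (List Int)) (i : Int) (j : Int) : Int :=
  PySem.List.pyGetD (PySem.List.pyGetD a i []) j 0

-- aux[i][j] = v  (i, j nonnegative in both loops)
def pvSet2 (a : List (List Int)) (i : Nat) (j : Int) (v : Int) : List (List Int) :=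
  a.set i ((a.getD i []).set j.toNat v)

def traverse_from_top_right (matrix : List (List Int)) (aux_matrix : List (List Int)) : List (List Int) :=
  (List.range matrix.length).foldl (fun aux i =>
    (PySem.List.pyRange (((matrix.headD []).length : Int) - 1) (-1) (-1)).foldl (fun aux j =>
      if i = 0 ∨ j = ((matrix.headD []).length : Int) - 1 then
        pvSet2 aux i j (pvGet2 matrix i j)
      else if pvGet2 matrix i j = 1 ∧ pvGet2 aux ((i : Int) - 1) (j + 1) > 0 then
        pvSet2 aux i j (pvGet2 aux ((i : Int) - 1) (j + 1) + 1)
      else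
        pvSet2 aux i j (pvGet2 matrix i j)) aux) aux_matrix

-- ===== PORT B =====
-- the value B writes at one step of a walk ('v' in Source B)
def pvStep (m : List (List Int)) (i : Nat) (j : Int) (prev : Option Int) : Int :=
  match prev with
  | none => pvGet2 m (i : Int) j
  | some p => if pvGet2 m (i : Int) j ≠ 1 ∨ p ≤ 0 then pvGet2 m (i : Int) j else p + 1

-- Source B's while loop: walk down-left from (i, j) carrying prev
def pvWalk (m : List (List Int)) (rows cols : Nat) (aux : List (List Int)) (i : Nat) (j : Int) (prev : Option Int) : List (List Int) :=
  if h : 0 ≤ j ∧ j < (cols : Int) ∧ i < rows then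
    pvWalk m rows cols (pvSet2 aux i j (pvStep m i j prev)) (i + 1) (j - 1) (some (pvStep m i j prev))
  else aux
termination_by (j + 1).toNat
decreasing_by omega

-- Source B's 'starts' list: top row left-to-right, then the rightmost column of rows 1..rows-1
def pvStarts (rows cols : Nat) : List (Nat × Int) :=
  (List.range cols).map (fun (j : Nat) => ((0 : Nat), (j : Int))) ++
  (List.range' 1 (rows - 1)).map (fun (i : Nat) => (i, (cols : Int) - 1))

def traverse_from_top_right_alt (matrix : List (List Int)) (aux_matrix : List (List Int)) : List (List Int) :=
  if matrix = [] then aux_matrix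
  else
    (pvStarts matrix.length (matrix.headD []).length).foldl
      (fun a s => pvWalk matrix matrix.length (matrix.headD []).length a s.1 s.2 none) aux_matrix

-- ===== PRECONDITION & SPEC =====
-- Pre_ is exactly the inputs on which A returns (no IndexError): when the first row is
-- nonempty, every row of matrix and of aux_matrix that A touches must have at least
-- len(matrix[0]) entries and aux_matrix at least as many rows as matrix.
def Pre_traverse_from_top_right (matrix : List (List Int)) (aux_matrix : List (List Int)) : Prop :=
  (matrix.headD []).length ≠ 0 →
    matrix.length ≤ aux_matrix.length ∧
    ∀ i < matrix.length,
      (matrix.headD []).length ≤ (matrix.getD i []).length ∧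
      (matrix.headD []).length ≤ (aux_matrix.getD i []).length

instance (matrix : List (List Int)) (aux_matrix : List (List Int)) : Decidable (Pre_traverse_from_top_right matrix aux_matrix) := by
  unfold Pre_traverse_from_top_right; infer_instance

def pvWitness_traverse_from_top_right : List (List Int) × List (List Int) :=
  ([[1, 1], [1, 1]], [[0, 0], [0, 0]])

def Spec_traverse_from_top_right (matrix : List (List Int)) (aux_matrix : List (List Int)) (out : List (List Int)) : Prop := out = traverse_from_top_right_alt matrix aux_matrix
instance (matrix : List (List Int)) (aux_matrix : List (List Int)) (out : List (List Int)) : Decidable (Spec_traverse_from_top_right matrix aux_matrix out) := by unfold Spec_traverse_from_top_right; infer_instance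

-- ===== CLAIM (what is proved, stated in full; the proofs are below) =====
def Claim_equal_traverse_from_top_right : Prop := ∀ (matrix : List (List Int)) (aux_matrix : List (List Int)), Dom_traverse_from_top_right matrix aux_matrix → Pre_traverse_from_top_right matrix aux_matrix → Spec_traverse_from_top_right matrix aux_matrix (traverse_from_top_right matrix aux_matrix)

-- ===== LEMMAS AND PROOFS =====

-- the DP table both programs compute: pvF m c i j is the final value of cell (i, j), j < c
def pvF (m : List (List Int)) (c : Nat) : Nat → Nat → Int
  | 0, j => (m.getD 0 []).getD j 0
  | i+1, j =>
      if j = c - 1 then (m.getD (i+1) []).getD j 0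
      else if (m.getD (i+1) []).getD j 0 = 1 ∧ 0 < pvF m c i (j+1) then pvF m c i (j+1) + 1
      else (m.getD (i+1) []).getD j 0

-- ---- generic list-surgery helpers ----

theorem pvGetD_set_self {α : Type} (l : List α) (n : Nat) (v d : α) (h : n < l.length) :
    (l.set n v).getD n d = v := by
  simp [List.getD, h]

theorem pvGetD_set_ne {α : Type} (l : List α) (n i : Nat) (v d : α) (h : n ≠ i) :
    (l.set n v).getD i d = l.getD i d := by
  simp [List.getD, h]

theorem pvSet_getD_self (l : List (List Int)) (n : Nat) (h : n < l.length) :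
    l.set n (l.getD n []) = l := by
  rw [List.getD_eq_getElem _ _ h, List.set_getElem_self]

theorem pvGetD_append_left (l1 l2 : List Int) (n : Nat) (h : n < l1.length) :
    (l1 ++ l2).getD n 0 = l1.getD n 0 := by
  simp [List.getD, List.getElem?_append_left h]

theorem pvGet2_eq (m : List (List Int)) (i : Nat) (j : Int) (hj : 0 ≤ j) :
    pvGet2 m (i : Int) j = (m.getD i []).getD j.toNat 0 := by
  unfold pvGet2
  rw [show j = ((j.toNat : Nat) : Int) from by omega]
  rw [PySem.List.pyGetD_natCast, PySem.List.pyGetD_natCast, Int.toNat_natCast]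

theorem pvSet2_length (aux : List (List Int)) (i : Nat) (j : Int) (v : Int) :
    (pvSet2 aux i j v).length = aux.length := by
  simp [pvSet2]

theorem pvSet2_rowlen (aux : List (List Int)) (i : Nat) (j : Int) (v : Int) (a : Nat) :
    ((pvSet2 aux i j v).getD a []).length = (aux.getD a []).length := by
  unfold pvSet2
  by_cases hi : i < aux.length
  · by_cases ha : i = a
    · subst ha
      rw [pvGetD_set_self _ _ _ _ hi]
      simp
    · rw [pvGetD_set_ne _ _ _ _ _ ha]
  · rw [List.set_eq_of_length_le (by omega)]

-- the countdown range of A's inner loop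
theorem pvDesc (c : Nat) :
    PySem.List.pyRange ((c : Int) - 1) (-1) (-1) = (List.range c).map (fun t : Nat => ((c : Int) - 1 - (t : Int))) := by
  rw [PySem.List.pyRange_neg_one]
  norm_num

-- ======== characterization of A ========

-- A's DP rows in functional form
def pvRowA (c : Nat) (prev : Option (List Int)) (row : List Int) : List Int :=
  match prev with
  | none => (List.range c).map (fun j => row.getD j 0)
  | some p => (List.range c).map (fun j =>
      if j = c - 1 ∨ row.getD j 0 ≠ 1 ∨ p.getD (j + 1) 0 ≤ 0 then row.getD j 0
      else p.getD (j + 1) 0 + 1)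

def pvBuildFrom (c : Nat) : Option (List Int) → List (List Int) → List (List Int)
  | _, [] => []
  | prev, r :: rs => pvRowA c prev r :: pvBuildFrom c (some (pvRowA c prev r)) rs

theorem pvRowA_length (c : Nat) (prev : Option (List Int)) (row : List Int) :
    (pvRowA c prev row).length = c := by
  cases prev <;> simp [pvRowA]

theorem pvRowA_none_getD (c : Nat) (row : List Int) (t : Nat) (ht : t < c) :
    (pvRowA c none row).getD t 0 = row.getD t 0 := by
  simp [pvRowA, List.getD, ht]

theorem pvRowA_some_getD (c : Nat) (p row : List Int) (t : Nat) (ht : t < c) :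
    (pvRowA c (some p) row).getD t 0
      = if t = c - 1 ∨ row.getD t 0 ≠ 1 ∨ p.getD (t + 1) 0 ≤ 0 then row.getD t 0
        else p.getD (t + 1) 0 + 1 := by
  simp [pvRowA, List.getD, ht]

theorem pvBuildFrom_getD_len (c : Nat) (rs : List (List Int)) :
    ∀ (prev : Option (List Int)) (k : Nat), k < rs.length →
      ((pvBuildFrom c prev rs).getD k []).length = c := by
  induction rs with
  | nil => intro prev k h; simp at h
  | cons r rs ih =>
      intro prev k h
      cases k with
      | zero => simp [pvBuildFrom, pvRowA_length]
      | succ k => simpa [pvBuildFrom] using ih _ k (by simpa using h)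

theorem pvBuildFrom_getD_succ (c : Nat) (rs : List (List Int)) :
    ∀ (prev : Option (List Int)) (i : Nat), i + 1 < rs.length →
      (pvBuildFrom c prev rs).getD (i + 1) []
        = pvRowA c (some ((pvBuildFrom c prev rs).getD i [])) (rs.getD (i + 1) []) := by
  induction rs with
  | nil => intro prev i h; simp at h
  | cons r rs ih =>
      intro prev i h
      cases i with
      | zero =>
          cases rs with
          | nil => simp at h
          | cons r' rs' => simp [pvBuildFrom]
      | succ i =>
          have := ih (some (pvRowA c prev r)) i (by simpa using h)
          simpa [pvBuildFrom] using this

-- entries of A's DP table are pvF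
theorem pvBuildFrom_eq_F (m : List (List Int)) (c : Nat) :
    ∀ (i : Nat), i < m.length → ∀ (j : Nat), j < c →
      ((pvBuildFrom c none m).getD i []).getD j 0 = pvF m c i j := by
  intro i
  induction i with
  | zero =>
      intro hi j hj
      cases m with
      | nil => simp at hi
      | cons r rs =>
          show ((pvBuildFrom c none (r :: rs)).getD 0 []).getD j 0 = pvF (r :: rs) c 0 j
          simp only [pvBuildFrom, List.getD_cons_zero]
          rw [pvRowA_none_getD _ _ _ hj]
          simp [pvF]
  | succ i ih =>
      intro hi j hj
      rw [pvBuildFrom_getD_succ c m none i hi]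
      rw [pvRowA_some_getD _ _ _ _ hj]
      by_cases hjc : j = c - 1
      · rw [if_pos (Or.inl hjc)]
        simp only [pvF]
        rw [if_pos hjc]
      · have hj1 : j + 1 < c := by omega
        rw [ih (by omega) (j + 1) hj1]
        simp only [pvF]
        rw [if_neg hjc]
        by_cases h1 : (m.getD (i + 1) []).getD j 0 = 1
        · by_cases h2 : 0 < pvF m c i (j + 1)
          · rw [if_neg (by push Not; exact ⟨hjc, h1, by omega⟩), if_pos ⟨h1, h2⟩]
          · rw [if_pos (Or.inr (Or.inr (by omega))), if_neg (by tauto)]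
        · rw [if_pos (Or.inr (Or.inl h1)), if_neg (by tauto)]

-- the partially rewritten row k during A's inner loop
def pvQ (auxk Fk : List Int) (c u : Nat) : List Int :=
  auxk.take u ++ Fk.drop u ++ auxk.drop c

theorem pvQ_c (auxk Fk : List Int) (c : Nat) (hF : Fk.length = c) (_hlen : c ≤ auxk.length) :
    pvQ auxk Fk c c = auxk := by
  unfold pvQ
  rw [List.drop_of_length_le (by omega)]
  simp

theorem pvQ_zero (auxk Fk : List Int) (c : Nat) :
    pvQ auxk Fk c 0 = Fk ++ auxk.drop c := by
  simp [pvQ]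

theorem pvQ_set (auxk Fk : List Int) (c u : Nat) (hu : 1 ≤ u) (huc : u ≤ c)
    (hlen : c ≤ auxk.length) (hF : Fk.length = c) :
    (pvQ auxk Fk c u).set (u - 1) (Fk.getD (u - 1) 0) = pvQ auxk Fk c (u - 1) := by
  cases u with
  | zero => omega
  | succ w =>
      simp only [Nat.add_sub_cancel]
      have hw : w < auxk.length := by omega
      have hwF : w < Fk.length := by omega
      have htk : auxk.take (w + 1) = auxk.take w ++ [auxk[w]] := by
        rw [List.take_add_one, List.getElem?_eq_getElem hw]
        simp
      have hdF : Fk.drop w = Fk[w] :: Fk.drop (w + 1) := (List.getElem_cons_drop hwF).symm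
      have hgd : Fk.getD w 0 = Fk[w] := List.getD_eq_getElem _ _ hwF
      unfold pvQ
      rw [htk, hdF, hgd]
      have hlen' : (auxk.take w).length = w := by
        simp [List.length_take]; omega
      rw [List.append_assoc, List.append_assoc]
      rw [List.set_append_right _ _ (by omega)]
      rw [hlen']
      rw [Nat.sub_self]
      simp only [List.set_cons_zero, List.nil_append, List.cons_append, List.append_assoc]

-- state after the first k rows have been processed by A
def pvWriteRow (R : List (List Int)) (c : Nat) (a : List (List Int)) (i : Nat) : List (List Int) :=
  a.set i (R.getD i [] ++ (a.getD i []).drop c)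

def pvMid (R : List (List Int)) (c : Nat) (aux : List (List Int)) (k : Nat) : List (List Int) :=
  (List.range k).foldl (pvWriteRow R c) aux

theorem pvMid_succ (R : List (List Int)) (c : Nat) (aux : List (List Int)) (k : Nat) :
    pvMid R c aux (k + 1) = pvWriteRow R c (pvMid R c aux k) k := by
  unfold pvMid
  rw [List.range_succ, List.foldl_append, List.foldl_cons, List.foldl_nil]

theorem pvMid_length (R : List (List Int)) (c : Nat) (aux : List (List Int)) (k : Nat) :
    (pvMid R c aux k).length = aux.length := by
  induction k with
  | zero => rfl
  | succ k ih => rw [pvMid_succ]; simp [pvWriteRow, ih]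

theorem pvMid_getD_ge (R : List (List Int)) (c : Nat) (aux : List (List Int)) (k i : Nat) (h : k ≤ i) :
    (pvMid R c aux k).getD i [] = aux.getD i [] := by
  induction k with
  | zero => rfl
  | succ k ih =>
      rw [pvMid_succ]
      unfold pvWriteRow
      rw [pvGetD_set_ne _ _ _ _ _ (by omega)]
      exact ih (by omega)

theorem pvMid_getD_lt (R : List (List Int)) (c : Nat) (aux : List (List Int)) (k : Nat)
    (hk : k ≤ aux.length) :
    ∀ i < k, (pvMid R c aux k).getD i [] = R.getD i [] ++ ((aux.getD i []).drop c) := by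
  induction k with
  | zero => intro i h; omega
  | succ k ih =>
      intro i h
      rw [pvMid_succ]
      unfold pvWriteRow
      by_cases hik : i = k
      · subst hik
        rw [pvGetD_set_self _ _ _ _ (by rw [pvMid_length]; omega)]
        rw [pvMid_getD_ge _ _ _ _ _ (le_refl i)]
      · rw [pvGetD_set_ne _ _ _ _ _ (fun hh => hik hh.symm)]
        exact ih (by omega) i (by omega)

-- A's inner-loop body as a named function (definitionally the lambda in the port)
def pvInner (m : List (List Int)) (i : Nat) (aux : List (List Int)) (j : Int) : List (List Int) :=
  if i = 0 ∨ j = ((m.headD []).length : Int) - 1 then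
    pvSet2 aux i j (pvGet2 m i j)
  else if pvGet2 m i j = 1 ∧ pvGet2 aux ((i : Int) - 1) (j + 1) > 0 then
    pvSet2 aux i j (pvGet2 aux ((i : Int) - 1) (j + 1) + 1)
  else
    pvSet2 aux i j (pvGet2 m i j)

theorem pvA_eq (m a : List (List Int)) :
    traverse_from_top_right m a
      = (List.range m.length).foldl (fun aux i =>
          (PySem.List.pyRange (((m.headD []).length : Int) - 1) (-1) (-1)).foldl (pvInner m i) aux) a := rfl

-- the inner loop, walked along the descending range
theorem pvInner_loop (m aux base : List (List Int)) (k : Nat) (Fk Fprev : List Int)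
    (c : Nat) (hc : c = (m.headD []).length)
    (hkb : k < base.length)
    (hbk : base.getD k [] = aux.getD k [])
    (hak : c ≤ (aux.getD k []).length)
    (hmk : c ≤ (m.getD k []).length)
    (hFkl : Fk.length = c)
    (hF0 : k = 0 → Fk = pvRowA c none (m.getD k []))
    (hFs : k ≠ 0 → Fk = pvRowA c (some Fprev) (m.getD k [])
            ∧ base.getD (k - 1) [] = Fprev ++ ((aux.getD (k - 1) []).drop c)
            ∧ Fprev.length = c) :
    ∀ (n s : Nat), s + n = c →
      ((List.range' s n).map (fun t : Nat => ((c : Int) - 1 - (t : Int)))).foldl (pvInner m k)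
        (base.set k (pvQ (aux.getD k []) Fk c (c - s)))
      = base.set k (pvQ (aux.getD k []) Fk c 0) := by
  intro n
  induction n with
  | zero =>
      intro s hs
      have h0 : c - s = 0 := by omega
      rw [h0]
      simp
  | succ n ih =>
      intro s hs
      have hsc : s < c := by omega
      set u : Nat := c - s with hu
      have hu1 : 1 ≤ u := by omega
      set t : Nat := u - 1 with ht
      have htc : t < c := by omega
      rw [List.range'_succ, List.map_cons, List.foldl_cons]
      have hj : ((c : Int) - 1 - (s : Int)) = ((t : Nat) : Int) := by omega
      have hvs : pvInner m k (base.set k (pvQ (aux.getD k []) Fk c u)) ((c : Int) - 1 - (s : Int))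
          = base.set k ((pvQ (aux.getD k []) Fk c u).set t (Fk.getD t 0)) := by
        have hmv : pvGet2 m (k : Int) ((c : Int) - 1 - (s : Int)) = (m.getD k []).getD t 0 := by
          rw [hj]; simp [pvGet2]
        have hset : ∀ v : Int,
            pvSet2 (base.set k (pvQ (aux.getD k []) Fk c u)) k ((c : Int) - 1 - (s : Int)) v
            = base.set k ((pvQ (aux.getD k []) Fk c u).set t v) := by
          intro v
          unfold pvSet2
          rw [hj]
          rw [pvGetD_set_self _ _ _ _ hkb, List.set_set]
          simp
        unfold pvInner
        by_cases hk0 : k = 0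
        · rw [if_pos (Or.inl hk0), hset, hmv]
          subst hk0
          rw [hF0 rfl, pvRowA_none_getD _ _ _ htc]
        · have hrec := hFs hk0
          by_cases hs0 : s = 0
          · have hjc : ((c : Int) - 1 - (s : Int)) = ((m.headD []).length : Int) - 1 := by
              rw [← hc]; omega
            rw [if_pos (Or.inr hjc), hset, hmv]
            have htc1 : t = c - 1 := by omega
            rw [hrec.1, pvRowA_some_getD _ _ _ _ htc]
            rw [if_pos (Or.inl htc1)]
          · have hcond : ¬ (k = 0 ∨ ((c : Int) - 1 - (s : Int)) = ((m.headD []).length : Int) - 1) := by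
              rw [← hc]
              push Not
              exact ⟨hk0, by omega⟩
            rw [if_neg hcond]
            have hprev : pvGet2 (base.set k (pvQ (aux.getD k []) Fk c u)) ((k : Int) - 1) (((c : Int) - 1 - (s : Int)) + 1)
                = Fprev.getD (t + 1) 0 := by
              have hk1 : ((k : Int) - 1) = ((k - 1 : Nat) : Int) := by omega
              have hj1 : (((c : Int) - 1 - (s : Int)) + 1) = ((t + 1 : Nat) : Int) := by omega
              rw [hk1, hj1]
              unfold pvGet2
              simp only [PySem.List.pyGetD_natCast]
              rw [pvGetD_set_ne _ _ _ _ _ (by omega)]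
              rw [hrec.2.1]
              exact pvGetD_append_left _ _ _ (by omega)
            rw [hprev, hmv, hset, hset]
            have htne : ¬ t = c - 1 := by omega
            rw [hrec.1, pvRowA_some_getD _ _ _ _ htc]
            by_cases h1 : (m.getD k []).getD t 0 = 1
            · by_cases h2 : Fprev.getD (t + 1) 0 > 0
              · rw [if_pos ⟨h1, h2⟩, if_neg (by push Not; exact ⟨htne, h1, by omega⟩)]
              · rw [if_neg (by tauto), if_pos (Or.inr (Or.inr (by omega)))]
            · rw [if_neg (by tauto), if_pos (Or.inr (Or.inl h1))]
      rw [hvs]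
      rw [pvQ_set _ _ _ _ hu1 (by omega) hak hFkl]
      have hnext : u - 1 = c - (s + 1) := by omega
      rw [hnext]
      exact ih (s + 1) (by omega)

-- A's outer loop
theorem pvOuter (m aux : List (List Int)) (c : Nat) (hc : c = (m.headD []).length) (_hc0 : c ≠ 0)
    (hlen : m.length ≤ aux.length)
    (hb : ∀ i < m.length, c ≤ (m.getD i []).length ∧ c ≤ (aux.getD i []).length) :
    ∀ k, k ≤ m.length →
      (List.range k).foldl (fun a i =>
          (PySem.List.pyRange (((m.headD []).length : Int) - 1) (-1) (-1)).foldl (pvInner m i) a) aux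
      = pvMid (pvBuildFrom c none m) c aux k := by
  intro k
  induction k with
  | zero => intro _; rfl
  | succ k ih =>
      intro hk
      have hkm : k < m.length := by omega
      rw [List.range_succ, List.foldl_append, List.foldl_cons, List.foldl_nil, ih (by omega)]
      set R : List (List Int) := pvBuildFrom c none m with hR
      set base : List (List Int) := pvMid R c aux k with hbase
      have hkb : k < base.length := by rw [hbase, pvMid_length]; omega
      have hbk : base.getD k [] = aux.getD k [] := pvMid_getD_ge _ _ _ _ _ (le_refl k)
      have hFkl : (R.getD k []).length = c := pvBuildFrom_getD_len c m none k hkm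
      have hF0 : k = 0 → R.getD k [] = pvRowA c none (m.getD k []) := by
        intro hk0
        subst hk0
        cases m with
        | nil => simp at hkm
        | cons r rs => rw [hR]; rfl
      have hFs : k ≠ 0 → R.getD k [] = pvRowA c (some (R.getD (k - 1) [])) (m.getD k [])
          ∧ base.getD (k - 1) [] = R.getD (k - 1) [] ++ ((aux.getD (k - 1) []).drop c)
          ∧ (R.getD (k - 1) []).length = c := by
        intro hk0
        refine ⟨?_, ?_, pvBuildFrom_getD_len c m none (k - 1) (by omega)⟩
        · have := pvBuildFrom_getD_succ c m none (k - 1) (by omega)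
          rwa [show k - 1 + 1 = k from by omega] at this
        · exact pvMid_getD_lt R c aux k (by omega) (k - 1) (by omega)
      rw [← hc, pvDesc]
      have hcast : ((List.range c).map (fun t : Nat => ((c : Int) - 1 - (t : Int))))
          = (List.range' 0 c).map (fun t : Nat => ((c : Int) - 1 - (t : Int))) := by
        rw [List.range_eq_range']
      rw [hcast]
      have hstart : base = base.set k (pvQ (aux.getD k []) (R.getD k []) c (c - 0)) := by
        rw [Nat.sub_zero, pvQ_c _ _ _ hFkl (hb k hkm).2, ← hbk, pvSet_getD_self _ _ hkb]
      rw [hstart]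
      rw [pvInner_loop m aux base k (R.getD k []) (R.getD (k - 1) []) c hc hkb hbk (hb k hkm).2
            (hb k hkm).1 hFkl hF0 hFs c 0 (by omega)]
      rw [pvMid_succ]
      unfold pvWriteRow
      rw [← hbase, hbk, pvQ_zero]

-- ======== characterization of B ========

-- 'cell (a, b) lies on the walk that starts at (i, j)'
def pvHit (rows : Nat) (i : Nat) (j : Int) (a b : Nat) : Bool :=
  decide (i ≤ a ∧ a < rows ∧ ((a - i : Nat) : Int) ≤ j ∧ (b : Int) = j - ((a - i : Nat) : Int))

-- invariant carried by prev along a walk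
def pvInv (m : List (List Int)) (c : Nat) (i : Nat) (j : Int) : Option Int → Prop
  | none => i = 0 ∨ j = (c : Int) - 1
  | some p => 1 ≤ i ∧ j ≤ (c : Int) - 2 ∧ p = pvF m c (i - 1) (j + 1).toNat

theorem pvStep_eq_F (m : List (List Int)) (c : Nat) (i : Nat) (j : Int) (prev : Option Int)
    (h0 : 0 ≤ j) (_hj : j < (c : Int)) (hinv : pvInv m c i j prev) :
    pvStep m i j prev = pvF m c i j.toNat := by
  cases prev with
  | none =>
      unfold pvStep
      rw [pvGet2_eq _ _ _ h0]
      rcases hinv with hi | hjc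
      · subst hi; simp [pvF]
      · cases i with
        | zero => simp [pvF]
        | succ i' =>
            have : j.toNat = c - 1 := by omega
            simp only [pvF]
            rw [if_pos this]
  | some p =>
      obtain ⟨hi1, hj2, hp⟩ := hinv
      cases i with
      | zero => omega
      | succ i' =>
          have ht : ¬ j.toNat = c - 1 := by omega
          have ht1 : (j + 1).toNat = j.toNat + 1 := by omega
          unfold pvStep
          rw [pvGet2_eq _ _ _ h0]
          simp only [pvF]
          rw [if_neg ht]
          rw [hp]
          simp only [Nat.add_sub_cancel, ht1]
          by_cases h1 : (m.getD (i' + 1) []).getD j.toNat 0 = 1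
          · by_cases h2 : 0 < pvF m c i' (j.toNat + 1)
            · rw [if_neg (by push Not; exact ⟨h1, by omega⟩), if_pos ⟨h1, h2⟩]
            · rw [if_pos (Or.inr (by omega)), if_neg (by tauto)]
          · rw [if_pos (Or.inl h1), if_neg (by tauto)]

theorem pvWalk_length (m : List (List Int)) (rows cols : Nat) :
    ∀ (n : Nat) (j : Int), (j + 1).toNat ≤ n →
      ∀ (i : Nat) (prev : Option Int) (aux : List (List Int)),
        (pvWalk m rows cols aux i j prev).length = aux.length := by
  intro n
  induction n with
  | zero =>
      intro j hj i prev aux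
      rw [pvWalk, dif_neg (by omega)]
  | succ n ih =>
      intro j hj i prev aux
      rw [pvWalk]
      by_cases h : 0 ≤ j ∧ j < (cols : Int) ∧ i < rows
      · rw [dif_pos h, ih (j - 1) (by omega), pvSet2_length]
      · rw [dif_neg h]

theorem pvWalk_length' (m : List (List Int)) (rows cols : Nat) (aux : List (List Int))
    (i : Nat) (j : Int) (prev : Option Int) :
    (pvWalk m rows cols aux i j prev).length = aux.length :=
  pvWalk_length m rows cols (j + 1).toNat j le_rfl i prev aux

theorem pvWalk_rowlen (m : List (List Int)) (rows cols : Nat) :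
    ∀ (n : Nat) (j : Int), (j + 1).toNat ≤ n →
      ∀ (i : Nat) (prev : Option Int) (aux : List (List Int)) (a : Nat),
        ((pvWalk m rows cols aux i j prev).getD a []).length = (aux.getD a []).length := by
  intro n
  induction n with
  | zero =>
      intro j hj i prev aux a
      rw [pvWalk, dif_neg (by omega)]
  | succ n ih =>
      intro j hj i prev aux a
      rw [pvWalk]
      by_cases h : 0 ≤ j ∧ j < (cols : Int) ∧ i < rows
      · rw [dif_pos h, ih (j - 1) (by omega), pvSet2_rowlen]
      · rw [dif_neg h]

theorem pvWalk_rowlen' (m : List (List Int)) (rows cols : Nat) (aux : List (List Int))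
    (i : Nat) (j : Int) (prev : Option Int) (a : Nat) :
    ((pvWalk m rows cols aux i j prev).getD a []).length = (aux.getD a []).length :=
  pvWalk_rowlen m rows cols (j + 1).toNat j le_rfl i prev aux a

-- pointwise effect of one walk
theorem pvWalk_getD (m : List (List Int)) (rows c : Nat) :
    ∀ (n : Nat) (j : Int), (j + 1).toNat ≤ n →
      ∀ (i : Nat) (prev : Option Int) (aux : List (List Int)),
        rows ≤ aux.length → (∀ a, a < rows → c ≤ (aux.getD a []).length) →
        j < (c : Int) → pvInv m c i j prev →
        ∀ (a b : Nat),
          ((pvWalk m rows c aux i j prev).getD a []).getD b 0 =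
            if pvHit rows i j a b then pvF m c a b else (aux.getD a []).getD b 0 := by
  intro n
  induction n with
  | zero =>
      intro j hj i prev aux _ _ hjc _ a b
      rw [pvWalk, dif_neg (by omega)]
      rw [if_neg]
      unfold pvHit
      simp only [decide_eq_true_eq, not_and]
      intro _ h2 h3
      omega
  | succ n ih =>
      intro j hj i prev aux hra hrb hjc hinv a b
      rw [pvWalk]
      by_cases h : 0 ≤ j ∧ j < (c : Int) ∧ i < rows
      · rw [dif_pos h]
        obtain ⟨h0, hjc', hir⟩ := h
        have hv : pvStep m i j prev = pvF m c i j.toNat := pvStep_eq_F m c i j prev h0 hjc hinv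
        rw [ih (j - 1) (by omega) (i + 1) (some (pvStep m i j prev)) (pvSet2 aux i j (pvStep m i j prev))
              (by rw [pvSet2_length]; exact hra)
              (by intro a' ha'; rw [pvSet2_rowlen]; exact hrb a' ha')
              (by omega)
              (by refine ⟨by omega, by omega, ?_⟩
                  rw [hv]
                  have hjj : ((j - 1) + 1).toNat = j.toNat := by omega
                  rw [hjj, Nat.add_sub_cancel])
              a b]
        by_cases hai : a = i
        · subst hai
          by_cases hbj : (b : Int) = j
          · have hbn : b = j.toNat := by omega
            rw [if_neg (by unfold pvHit; simp only [decide_eq_true_eq, not_and]; intro h1; omega)]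
            rw [if_pos (by unfold pvHit; simp only [decide_eq_true_eq]
                           exact ⟨le_refl a, hir, by omega, by omega⟩)]
            unfold pvSet2
            rw [pvGetD_set_self _ _ _ _ (by omega)]
            rw [hbn]
            rw [pvGetD_set_self _ _ _ _ (by have := hrb a hir; omega)]
            exact hv
          · rw [if_neg (by unfold pvHit; simp only [decide_eq_true_eq, not_and]; intro h1; omega)]
            rw [if_neg (by unfold pvHit; simp only [decide_eq_true_eq, not_and]; intro _ _ h3 h4; simp at h3 h4; omega)]
            unfold pvSet2
            rw [pvGetD_set_self _ _ _ _ (by omega)]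
            rw [pvGetD_set_ne _ _ _ _ _ (by omega)]
        · have hcond : (pvHit rows (i + 1) (j - 1) a b = true) ↔ (pvHit rows i j a b = true) := by
            unfold pvHit
            simp only [decide_eq_true_eq]
            constructor
            · rintro ⟨h1, h2, h3, h4⟩
              refine ⟨by omega, h2, ?_, ?_⟩ <;>
                · have : (a - i : Nat) = (a - (i + 1) : Nat) + 1 := by omega
                  rw [this]; push_cast; omega
            · rintro ⟨h1, h2, h3, h4⟩
              have hi1 : i + 1 ≤ a := by omega
              refine ⟨hi1, h2, ?_, ?_⟩ <;>
                · have : (a - i : Nat) = (a - (i + 1) : Nat) + 1 := by omega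
                  rw [this] at h3 h4; push_cast at h3 h4; omega
          by_cases hhit : pvHit rows i j a b
          · rw [if_pos (hcond.mpr hhit), if_pos hhit]
          · rw [if_neg (fun hh => hhit (hcond.mp hh)), if_neg hhit]
            unfold pvSet2
            rw [pvGetD_set_ne _ _ _ _ _ (fun hh => hai hh.symm)]
      · rw [dif_neg h]
        rw [if_neg]
        unfold pvHit
        simp only [decide_eq_true_eq, not_and]
        intro h1 h2 h3
        omega

-- pointwise effect of folding walks over a list of starts
theorem pvFold_getD (m : List (List Int)) (rows c : Nat) :
    ∀ (S : List (Nat × Int)) (aux : List (List Int)),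
      rows ≤ aux.length → (∀ a, a < rows → c ≤ (aux.getD a []).length) →
      (∀ s ∈ S, s.2 < (c : Int) ∧ (s.1 = 0 ∨ s.2 = (c : Int) - 1)) →
      ∀ (a b : Nat),
        (((S.foldl (fun x s => pvWalk m rows c x s.1 s.2 none) aux)).getD a []).getD b 0 =
          if S.any (fun s => pvHit rows s.1 s.2 a b) then pvF m c a b
          else (aux.getD a []).getD b 0 := by
  intro S
  induction S with
  | nil => intro aux _ _ _ a b; simp
  | cons s S ih =>
      intro aux hra hrb hval a b
      have hs := hval s (List.mem_cons_self)
      simp only [List.foldl_cons, List.any_cons]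
      rw [ih (pvWalk m rows c aux s.1 s.2 none)
            (by rw [pvWalk_length']; exact hra)
            (by intro a' ha'; rw [pvWalk_rowlen']; exact hrb a' ha')
            (fun t ht => hval t (List.mem_cons_of_mem _ ht)) a b]
      by_cases hS : S.any (fun t => pvHit rows t.1 t.2 a b)
      · rw [if_pos hS, if_pos (by simp [hS])]
      · rw [if_neg hS]
        rw [pvWalk_getD m rows c (s.2 + 1).toNat s.2 le_rfl s.1 none aux hra hrb hs.1 hs.2 a b]
        by_cases hh : pvHit rows s.1 s.2 a b
        · rw [if_pos hh, if_pos (by simp [hh])]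
        · rw [if_neg hh, if_neg (by simp [hh, hS])]

-- a walk started at a negative column does nothing
theorem pvWalk_neg (m : List (List Int)) (rows cols : Nat) (aux : List (List Int))
    (i : Nat) (j : Int) (prev : Option Int) (h : j < 0) :
    pvWalk m rows cols aux i j prev = aux := by
  rw [pvWalk, dif_neg (by omega)]

-- a fold of walks that all start at negative columns is the identity
theorem pvFold_neg (m : List (List Int)) (rows cols : Nat) :
    ∀ (S : List (Nat × Int)), (∀ s ∈ S, s.2 < 0) → ∀ (aux : List (List Int)),
      S.foldl (fun a s => pvWalk m rows cols a s.1 s.2 none) aux = aux := by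
  intro S
  induction S with
  | nil => intro _ aux; rfl
  | cons s S ih =>
      intro h aux
      simp only [List.foldl_cons]
      rw [pvWalk_neg _ _ _ _ _ _ _ (h s List.mem_cons_self)]
      exact ih (fun t ht => h t (List.mem_cons_of_mem _ ht)) aux

-- validity of the starts
theorem pvStarts_valid (rows c : Nat) :
    ∀ s ∈ pvStarts rows c, s.2 < (c : Int) ∧ (s.1 = 0 ∨ s.2 = (c : Int) - 1) := by
  intro s hs
  unfold pvStarts at hs
  simp only [List.mem_append, List.mem_map, List.mem_range, List.mem_range'_1] at hs
  rcases hs with ⟨j, hj, rfl⟩ | ⟨i, hi, rfl⟩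
  · exact ⟨by omega, Or.inl rfl⟩
  · exact ⟨by omega, Or.inr rfl⟩

-- with no columns, B's whole fold is the identity
theorem pvFold_c0 (m : List (List Int)) (rows : Nat) (aux : List (List Int)) :
    (pvStarts rows 0).foldl (fun a s => pvWalk m rows 0 a s.1 s.2 none) aux = aux := by
  apply pvFold_neg
  intro s hs
  have := pvStarts_valid rows 0 s hs
  omega

-- every in-range cell lies on exactly the diagonal through it; out-of-range cells on none
theorem pvStarts_cover (rows c a b : Nat) :
    (pvStarts rows c).any (fun s => pvHit rows s.1 s.2 a b) = (decide (a < rows) && decide (b < c)) := by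
  by_cases hr : a < rows
  · by_cases hb : b < c
    · simp only [hr, hb, decide_true, Bool.and_self]
      rw [List.any_eq_true]
      unfold pvStarts
      by_cases hd : a + b < c
      · refine ⟨((0 : Nat), ((a + b : Nat) : Int)), ?_, ?_⟩
        · simp only [List.mem_append, List.mem_map, List.mem_range]
          exact Or.inl ⟨a + b, hd, rfl⟩
        · unfold pvHit
          simp only [decide_eq_true_eq]
          refine ⟨Nat.zero_le a, hr, ?_, ?_⟩ <;> · push_cast; omega
      · refine ⟨(a + b - (c - 1), (c : Int) - 1), ?_, ?_⟩
        · simp only [List.mem_append, List.mem_map, List.mem_range'_1]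
          exact Or.inr ⟨a + b - (c - 1), ⟨by omega, by omega⟩, rfl⟩
        · unfold pvHit
          simp only [decide_eq_true_eq]
          refine ⟨by omega, hr, ?_, ?_⟩ <;>
            · have h1 : (a - (a + b - (c - 1)) : Nat) = c - 1 - b := by omega
              rw [h1]; omega
    · simp only [hb, decide_false, Bool.and_false]
      rw [List.any_eq_false]
      intro s hs
      have hv := pvStarts_valid rows c s hs
      unfold pvHit
      simp only [decide_eq_true_eq, not_and]
      intro _ _ h3 h4
      omega
  · simp only [hr, decide_false, Bool.false_and]
    rw [List.any_eq_false]
    intro s hs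
    unfold pvHit
    simp only [decide_eq_true_eq, not_and]
    intro _ h2
    omega

-- pointwise characterization of B (m nonempty, c possibly 0 handled separately)
theorem pvB_getD (m aux : List (List Int)) (hm : ¬ m = []) (c : Nat) (hc : c = (m.headD []).length)
    (_hc0 : c ≠ 0) (hra : m.length ≤ aux.length) (hrb : ∀ a, a < m.length → c ≤ (aux.getD a []).length)
    (a b : Nat) :
    ((traverse_from_top_right_alt m aux).getD a []).getD b 0 =
      if a < m.length ∧ b < c then pvF m c a b else (aux.getD a []).getD b 0 := by
  unfold traverse_from_top_right_alt
  rw [if_neg hm, ← hc]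
  rw [pvFold_getD m m.length c (pvStarts m.length c) aux hra hrb (pvStarts_valid _ _) a b]
  rw [pvStarts_cover]
  by_cases h1 : a < m.length
  · by_cases h2 : b < c
    · rw [if_pos (by simp [h1, h2]), if_pos ⟨h1, h2⟩]
    · rw [if_neg (by simp [h2]), if_neg (by tauto)]
  · rw [if_neg (by simp [h1]), if_neg (by tauto)]

-- B preserves the outer length and every row length
theorem pvB_length (m aux : List (List Int)) :
    (traverse_from_top_right_alt m aux).length = aux.length := by
  unfold traverse_from_top_right_alt
  by_cases hm : m = []
  · rw [if_pos hm]
  · rw [if_neg hm]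
    induction (pvStarts m.length (m.headD []).length) generalizing aux with
    | nil => rfl
    | cons s S ih =>
        simp only [List.foldl_cons]
        rw [ih (pvWalk m m.length (m.headD []).length aux s.1 s.2 none), pvWalk_length']

theorem pvB_rowlen (m aux : List (List Int)) (a : Nat) :
    ((traverse_from_top_right_alt m aux).getD a []).length = (aux.getD a []).length := by
  unfold traverse_from_top_right_alt
  by_cases hm : m = []
  · rw [if_pos hm]
  · rw [if_neg hm]
    induction (pvStarts m.length (m.headD []).length) generalizing aux with
    | nil => rfl
    | cons s S ih =>
        simp only [List.foldl_cons]
        rw [ih (pvWalk m m.length (m.headD []).length aux s.1 s.2 none), pvWalk_rowlen']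

-- pointwise characterization of A
theorem pvA_getD (m aux : List (List Int)) (_hm : ¬ m = []) (c : Nat) (hc : c = (m.headD []).length)
    (hc0 : c ≠ 0) (hra : m.length ≤ aux.length)
    (hb : ∀ i < m.length, c ≤ (m.getD i []).length ∧ c ≤ (aux.getD i []).length)
    (a b : Nat) :
    ((traverse_from_top_right m aux).getD a []).getD b 0 =
      if a < m.length ∧ b < c then pvF m c a b else (aux.getD a []).getD b 0 := by
  rw [pvA_eq]
  rw [show ((m.headD []).length : Int) = (c : Int) by rw [hc]] at *
  rw [show (List.range m.length).foldl (fun a_1 i => (PySem.List.pyRange ((c:Int) - 1) (-1) (-1)).foldl (pvInner m i) a_1) aux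
        = pvMid (pvBuildFrom c none m) c aux m.length from by
      have := pvOuter m aux c hc hc0 hra hb m.length (le_refl _)
      rw [← this, hc]]
  by_cases h1 : a < m.length
  · rw [pvMid_getD_lt (pvBuildFrom c none m) c aux m.length hra a h1]
    by_cases h2 : b < c
    · rw [if_pos ⟨h1, h2⟩]
      rw [pvGetD_append_left _ _ _ (by rw [pvBuildFrom_getD_len c m none a h1]; exact h2)]
      exact pvBuildFrom_eq_F m c a h1 b h2
    · rw [if_neg (by tauto)]
      have hlen : ((pvBuildFrom c none m).getD a []).length = c := pvBuildFrom_getD_len c m none a h1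
      simp only [List.getD] at hlen ⊢
      rw [List.getElem?_append_right (by omega)]
      rw [List.getElem?_drop]
      have hidx : c + (b - ((pvBuildFrom c none m)[a]?.getD []).length) = b := by omega
      rw [hidx]
  · rw [pvMid_getD_ge _ _ _ _ _ (by omega), if_neg (by tauto)]

-- A's output lengths
theorem pvA_length (m aux : List (List Int)) (_hm : ¬ m = []) (c : Nat) (hc : c = (m.headD []).length)
    (hc0 : c ≠ 0) (hra : m.length ≤ aux.length)
    (hb : ∀ i < m.length, c ≤ (m.getD i []).length ∧ c ≤ (aux.getD i []).length) :
    (traverse_from_top_right m aux).length = aux.length := by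
  rw [pvA_eq]
  rw [show (List.range m.length).foldl (fun a_1 i => (PySem.List.pyRange (((m.headD []).length:Int) - 1) (-1) (-1)).foldl (pvInner m i) a_1) aux
        = pvMid (pvBuildFrom c none m) c aux m.length from pvOuter m aux c hc hc0 hra hb m.length (le_refl _)]
  exact pvMid_length _ _ _ _

theorem pvA_rowlen (m aux : List (List Int)) (_hm : ¬ m = []) (c : Nat) (hc : c = (m.headD []).length)
    (hc0 : c ≠ 0) (hra : m.length ≤ aux.length)
    (hb : ∀ i < m.length, c ≤ (m.getD i []).length ∧ c ≤ (aux.getD i []).length) (a : Nat) :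
    ((traverse_from_top_right m aux).getD a []).length = (aux.getD a []).length := by
  rw [pvA_eq]
  rw [show (List.range m.length).foldl (fun a_1 i => (PySem.List.pyRange (((m.headD []).length:Int) - 1) (-1) (-1)).foldl (pvInner m i) a_1) aux
        = pvMid (pvBuildFrom c none m) c aux m.length from pvOuter m aux c hc hc0 hra hb m.length (le_refl _)]
  by_cases h1 : a < m.length
  · rw [pvMid_getD_lt (pvBuildFrom c none m) c aux m.length hra a h1]
    rw [List.length_append, pvBuildFrom_getD_len c m none a h1, List.length_drop]
    have := (hb a h1).2
    omega
  · rw [pvMid_getD_ge _ _ _ _ _ (by omega)]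

-- two lists of lists with equal lengths, equal row lengths and equal getD entries are equal
theorem pvExt (x y : List (List Int)) (hl : x.length = y.length)
    (hrl : ∀ a, (x.getD a []).length = (y.getD a []).length)
    (he : ∀ a b, (x.getD a []).getD b 0 = (y.getD a []).getD b 0) : x = y := by
  apply List.ext_getElem hl
  intro n h1 h2
  apply List.ext_getElem
  · have := hrl n
    rwa [List.getD_eq_getElem _ _ h1, List.getD_eq_getElem _ _ h2] at this
  · intro k hk1 hk2
    have := he n k
    rwa [List.getD_eq_getElem _ _ h1, List.getD_eq_getElem _ _ h2,
         List.getD_eq_getElem _ _ hk1, List.getD_eq_getElem _ _ hk2] at this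

-- ===== VERDICT (by name: the statement is the Claim_ definition above) =====
theorem traverse_from_top_right_spec : Claim_equal_traverse_from_top_right := by
  intro m aux _ hpre
  unfold Spec_traverse_from_top_right
  by_cases hm : m = []
  · subst hm
    simp [traverse_from_top_right, traverse_from_top_right_alt]
  · by_cases hc0 : (m.headD []).length = 0
    · have hAa : traverse_from_top_right m aux = aux := by
        rw [pvA_eq]
        have hA : PySem.List.pyRange (((m.headD []).length : Int) - 1) (-1) (-1) = [] := by
          rw [hc0]; simp
        rw [hA]
        simp only [List.foldl_nil]
        induction (List.range m.length) with
        | nil => rfl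
        | cons x xs ih => simp [ih]
      have hBa : traverse_from_top_right_alt m aux = aux := by
        unfold traverse_from_top_right_alt
        rw [if_neg hm, hc0]
        exact pvFold_c0 m m.length aux
      rw [hAa, hBa]
    · obtain ⟨hlen, hb⟩ := hpre hc0
      apply pvExt
      · rw [pvA_length m aux hm _ rfl hc0 hlen hb, pvB_length]
      · intro a
        rw [pvA_rowlen m aux hm _ rfl hc0 hlen hb, pvB_rowlen]
      · intro a b
        rw [pvA_getD m aux hm _ rfl hc0 hlen hb a b,
            pvB_getD m aux hm _ rfl hc0 hlen (fun a' ha' => (hb a' ha').2) a b]
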